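-- pv_equiv track=rewrite | github.com/RafaelGoncalves-bit/Cortador2.0 | core/scripts/extrator.py | limpar_nome
-- ===== SOURCE A (Python) =====
-- def limpar_nome(nome):
--     cortes = [
--         " ANALISTA", " AUXILIAR", " ASSISTENTE",
--         " AGENTE", " GERENTE", " COORDENADOR",
--         " SUPERVISOR", " VENDEDOR"
--     ]
--
--     for corte in cortes:
--         if corte in nome:
--             nome = nome.split(corte)[0]
--
--     return nome.strip()
-- ===== SOURCE B (Python) =====
-- def limpar_nome(nome):
--     cortes = [
--         " ANALISTA", " AUXILIAR", " ASSISTENTE",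
--         " AGENTE", " GERENTE", " COORDENADOR",
--         " SUPERVISOR", " VENDEDOR"
--     ]
--     cuts = [p for p in (nome.find(c) for c in cortes) if p != -1]
--     if cuts:
--         nome = nome[:min(cuts)]
--     return nome.strip()
-- ===== Notes on version B (the rewrite author's own statement) =====
-- stated objective: simpler
-- what changed: A truncates the name eight times in sequence (contains-check then split on each keyword); B computes each keyword's find position once and performs a single cut at the leftmost occurrence, then strips.
import Mathlib
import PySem

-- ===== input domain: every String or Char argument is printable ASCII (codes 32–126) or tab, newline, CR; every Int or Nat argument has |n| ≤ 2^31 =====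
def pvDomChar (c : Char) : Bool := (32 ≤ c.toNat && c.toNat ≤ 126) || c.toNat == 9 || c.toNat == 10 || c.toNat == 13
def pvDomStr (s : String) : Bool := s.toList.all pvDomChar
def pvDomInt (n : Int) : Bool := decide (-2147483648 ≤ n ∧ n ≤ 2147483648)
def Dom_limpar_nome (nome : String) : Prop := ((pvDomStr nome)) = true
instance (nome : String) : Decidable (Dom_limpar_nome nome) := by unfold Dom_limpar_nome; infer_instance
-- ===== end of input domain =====

-- B replaces A's eight successive contains/split truncations by computing each keyword's find position once and cutting at the leftmost hit (objective: simpler single cut).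

-- ===== PORT A =====
def limpar_nome (nome : String) : String :=
  let cortes : List String := [" ANALISTA", " AUXILIAR", " ASSISTENTE", " AGENTE",
                               " GERENTE", " COORDENADOR", " SUPERVISOR", " VENDEDOR"]
  let nome := cortes.foldl (fun nome corte =>
    if PySem.Str.isIn corte nome then
      -- nome.split(corte)[0]: corte is a nonempty literal, so split? is some and nonempty; [0] is its head
      ((PySem.Str.split? nome corte).getD []).headD ""
    else nome) nome
  PySem.Str.strip nome

-- ===== PORT B =====
def limpar_nome_alt (nome : String) : String :=
  let cortes : List String := [" ANALISTA", " AUXILIAR", " ASSISTENTE", " AGENTE",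
                               " GERENTE", " COORDENADOR", " SUPERVISOR", " VENDEDOR"]
  let cuts := (cortes.map (fun c => PySem.Str.find nome c)).filter (fun p => decide (p ≠ -1))
  let nome := match PySem.List.min? cuts (fun p => p) with
    | some m => PySem.Str.slice nome none (some m)
    | none => nome
  PySem.Str.strip nome

-- ===== PRECONDITION & SPEC =====
def Spec_limpar_nome (nome : String) (out : String) : Prop := out = limpar_nome_alt nome
instance (nome : String) (out : String) : Decidable (Spec_limpar_nome nome out) := by unfold Spec_limpar_nome; infer_instance

-- ===== CLAIM (what is proved, stated in full; the proofs are below) =====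
def Claim_equal_limpar_nome : Prop := ∀ (nome : String), Dom_limpar_nome nome → Spec_limpar_nome nome (limpar_nome nome)

-- ===== LEMMAS AND PROOFS =====

-- A's per-keyword truncation step, at the List Char level.
def pvStep (s k : List Char) : List Char :=
  if PySem.Chars.isIn k s then (PySem.Chars.splitOn s k).headD [] else s

-- Shape of the job-title keywords: a leading space, no space afterwards.
def pvShape (k : List Char) : Prop := k.head? = some ' ' ∧ (k.tail.all (fun c => c != ' ')) = true

def pvCuts (s : List Char) (K : List (List Char)) : List Int :=
  (K.map (fun k => PySem.Chars.find s k)).filter (fun p => decide (p ≠ -1))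

def pvMin (l : List Int) : Option Int := PySem.List.min? l (fun p => p)

def pvCut (s : List Char) (K : List (List Char)) : List Char :=
  match pvMin (pvCuts s K) with
  | some m => s.take m.toNat
  | none => s

-- min? on Int with the identity key computes the list minimum
theorem pvMin_cons (x : Int) (xs : List Int) : pvMin (x :: xs) = some (xs.foldl min x) := by
  unfold pvMin
  simp only [PySem.List.min?, List.foldl]
  induction xs generalizing x with
  | nil => rfl
  | cons y ys ih =>
    simp only [List.foldl]
    rw [← ih (min x y)]
    congr 1
    by_cases h : y < x
    · simp [h, le_of_lt h]
    · simp [h, min_def, not_lt.mp h]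

-- an occurrence anywhere makes find nonnegative
theorem pvFind_nonneg_of_occ {s k : List Char} {n : Nat} (h : k <+: s.drop n) :
    0 ≤ PySem.Chars.find s k := by
  rw [PySem.Chars.find_nonneg_iff]
  exact h.isInfix.trans (List.drop_suffix n s).isInfix

-- find is determined by a first occurrence
theorem pvFind_eq (s k : List Char) (n : Nat) (h1 : k <+: s.drop n)
    (h2 : ∀ i < n, ¬ k <+: s.drop i) : PySem.Chars.find s k = n := by
  have h0 : 0 ≤ PySem.Chars.find s k := pvFind_nonneg_of_occ h1
  obtain ⟨hocc, hmin⟩ := PySem.Chars.find_spec h0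
  rcases lt_trichotomy (PySem.Chars.find s k).toNat n with h | h | h
  · exact absurd hocc (h2 _ h)
  · omega
  · exact absurd h1 (hmin n h)

-- head of splitOn.go once the accumulator already holds the first piece
theorem pvGo_head_acc (sep : List Char) : ∀ (fuel : Nat) (l cur a0 : List Char) (acc : List (List Char)),
    (PySem.Chars.splitOn.go sep fuel l cur (acc ++ [a0])).head? = some a0 := by
  intro fuel
  induction fuel with
  | zero =>
    intro l cur a0 acc
    show (((cur.reverse ++ l) :: (acc ++ [a0])).reverse).head? = some a0
    rw [show (cur.reverse ++ l) :: (acc ++ [a0]) = ((cur.reverse ++ l) :: acc) ++ [a0] by simp]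
    simp
  | succ fuel ih =>
    intro l cur a0 acc
    match l with
    | [] =>
      show ((cur.reverse :: (acc ++ [a0])).reverse).head? = some a0
      rw [show cur.reverse :: (acc ++ [a0]) = (cur.reverse :: acc) ++ [a0] by simp]
      simp
    | c :: rest =>
      show (if sep.isPrefixOf (c :: rest) = true then
              PySem.Chars.splitOn.go sep fuel (List.drop sep.length (c :: rest)) [] (cur.reverse :: (acc ++ [a0]))
            else PySem.Chars.splitOn.go sep fuel rest (c :: cur) (acc ++ [a0])).head? = some a0
      by_cases h : sep.isPrefixOf (c :: rest) = true
      · rw [if_pos h]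
        rw [show cur.reverse :: (acc ++ [a0]) = (cur.reverse :: acc) ++ [a0] by simp]
        exact ih _ _ _ _
      · rw [if_neg h]
        exact ih _ _ _ _

-- head of splitOn.go from an empty accumulator: the first piece ends at the first occurrence
theorem pvGo_head (sep : List Char) (hsep : sep ≠ []) : ∀ (fuel : Nat) (l cur : List Char),
    l.length < fuel →
    (PySem.Chars.splitOn.go sep fuel l cur []).head? =
      some (cur.reverse ++ (if PySem.Chars.isIn sep l then l.take (PySem.Chars.find l sep).toNat else l)) := by
  intro fuel
  induction fuel with
  | zero => intro l cur h; omega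
  | succ fuel ih =>
    intro l cur hlen
    match l with
    | [] =>
      show (([cur.reverse] : List (List Char)).reverse).head? = _
      have hni : PySem.Chars.isIn sep ([] : List Char) = false := by
        rw [PySem.Chars.isIn_eq_false_iff]
        intro h
        exact hsep (List.eq_nil_of_infix_nil h)
      simp [hni]
    | c :: rest =>
      show (if sep.isPrefixOf (c :: rest) = true then
              PySem.Chars.splitOn.go sep fuel (List.drop sep.length (c :: rest)) [] [cur.reverse]
            else PySem.Chars.splitOn.go sep fuel rest (c :: cur) []).head? = _
      by_cases hpre : sep.isPrefixOf (c :: rest) = true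
      · rw [if_pos hpre]
        have hp : sep <+: (c :: rest) := by rwa [List.isPrefixOf_iff_prefix] at hpre
        have hfind : PySem.Chars.find (c :: rest) sep = (0 : Nat) :=
          pvFind_eq _ _ 0 (by simpa using hp) (by omega)
        have hin : PySem.Chars.isIn sep (c :: rest) = true := by
          rw [← Bool.not_eq_false, ← ne_eq]
          intro h
          rw [PySem.Chars.isIn_eq_false_iff] at h
          exact h hp.isInfix
        rw [show ([cur.reverse] : List (List Char)) = [] ++ [cur.reverse] from rfl]
        rw [pvGo_head_acc sep fuel _ [] cur.reverse []]
        simp [hin, hfind]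
      · rw [if_neg hpre]
        have hnp : ¬ sep <+: (c :: rest) := by rwa [List.isPrefixOf_iff_prefix] at hpre
        rw [ih rest (c :: cur) (by simpa using Nat.lt_of_succ_lt_succ (by simpa using hlen))]
        congr 1
        rw [List.reverse_cons, List.append_assoc]
        congr 1
        by_cases hr : PySem.Chars.isIn sep rest = true
        · have hin : PySem.Chars.isIn sep (c :: rest) = true := by
            rw [PySem.Chars.isIn_iff_infix] at hr ⊢
            exact hr.trans (List.suffix_cons c rest).isInfix
          have h0 : 0 ≤ PySem.Chars.find rest sep := by
            rw [PySem.Chars.find_nonneg_iff, ← PySem.Chars.isIn_iff_infix]; exact hr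
          obtain ⟨hocc, hmin⟩ := PySem.Chars.find_spec h0
          have hfind : PySem.Chars.find (c :: rest) sep = ((PySem.Chars.find rest sep).toNat + 1 : Nat) := by
            apply pvFind_eq
            · simpa [List.drop_succ_cons] using hocc
            · intro i hi
              match i with
              | 0 => simpa using hnp
              | j + 1 =>
                rw [List.drop_succ_cons]
                exact hmin j (by omega)
          rw [hin, hr, hfind, Int.toNat_natCast, List.take_succ_cons]
          simp
        · have hin : PySem.Chars.isIn sep (c :: rest) = false := by
            rw [PySem.Chars.isIn_eq_false_iff]
            intro h
            have : ∃ j, sep <+: List.drop j (c :: rest) := by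
              rw [PySem.Chars.exists_prefix_drop_iff_isIn, PySem.Chars.isIn_iff_infix]
              exact h
            obtain ⟨j, hj⟩ := this
            match j with
            | 0 => exact hnp (by simpa using hj)
            | j + 1 =>
              rw [List.drop_succ_cons] at hj
              rw [← PySem.Chars.exists_prefix_drop_iff_isIn] at hr
              exact hr ⟨j, hj⟩
          rw [hin, Bool.not_eq_true] at *
          rw [hr]
          simp

theorem pvSplitOn_head (s sep : List Char) (hsep : sep ≠ []) :
    (PySem.Chars.splitOn s sep).headD [] =
      if PySem.Chars.isIn sep s then s.take (PySem.Chars.find s sep).toNat else s := by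
  have h := pvGo_head sep hsep (s.length + 1) s [] (by omega)
  show (PySem.Chars.splitOn.go sep (s.length + 1) s [] []).headD [] = _
  cases hres : PySem.Chars.splitOn.go sep (s.length + 1) s [] [] with
  | nil => rw [hres] at h; simp at h
  | cons a t =>
    rw [hres] at h
    simp only [List.head?_cons, Option.some.injEq] at h
    simpa using h

theorem pvStep_eq (s k : List Char) (hk : k ≠ []) :
    pvStep s k = if PySem.Chars.isIn k s then s.take (PySem.Chars.find s k).toNat else s := by
  unfold pvStep
  by_cases hin : PySem.Chars.isIn k s = true
  · rw [if_pos hin, if_pos hin, pvSplitOn_head s k hk, if_pos hin]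
  · rw [if_neg hin, if_neg hin]

-- find in the prefix cut at a space position: unchanged if it lands before the cut, else absent
theorem pvFind_take (s k' : List Char) (p : Nat) (hsp : (s.drop p).head? = some ' ')
    (hk : k'.head? = some ' ') (ht : ∀ c ∈ k'.tail, c ≠ ' ') :
    PySem.Chars.find (s.take p) k' =
      if 0 ≤ PySem.Chars.find s k' ∧ PySem.Chars.find s k' < (p : Int)
      then PySem.Chars.find s k' else -1 := by
  have hk'ne : k' ≠ [] := by intro h; simp [h] at hk
  by_cases h0 : 0 ≤ PySem.Chars.find s k'
  · obtain ⟨hocc, hmin⟩ := PySem.Chars.find_spec h0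
    by_cases hlt : PySem.Chars.find s k' < (p : Int)
    · rw [if_pos ⟨h0, hlt⟩]
      have hqp : (PySem.Chars.find s k').toNat < p := by omega
      have hfits : (PySem.Chars.find s k').toNat + k'.length ≤ p := by
        by_contra hno
        push_neg at hno
        obtain ⟨t, htap⟩ := hocc
        have h1 : s.drop p = (s.drop (PySem.Chars.find s k').toNat).drop (p - (PySem.Chars.find s k').toNat) := by
          rw [List.drop_drop]; congr 1; omega
        have h2 : (s.drop p).head? = (k' ++ t)[p - (PySem.Chars.find s k').toNat]? := by
          rw [h1, ← htap, List.head?_drop]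
        have h3 : (k' ++ t)[p - (PySem.Chars.find s k').toNat]? = k'[p - (PySem.Chars.find s k').toNat]? :=
          List.getElem?_append_left (by omega)
        have h4 : k'[p - (PySem.Chars.find s k').toNat]? = some ' ' := by rw [← h3, ← h2, hsp]
        have h6 : k'.tail[p - (PySem.Chars.find s k').toNat - 1]? = some ' ' := by
          rw [show k'.tail = k'.drop 1 from (List.drop_one ..).symm, List.getElem?_drop]
          rw [show 1 + (p - (PySem.Chars.find s k').toNat - 1) = p - (PySem.Chars.find s k').toNat by omega]
          exact h4
        exact ht ' ' (List.mem_of_getElem? h6) rfl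
      have hres : PySem.Chars.find (s.take p) k' = ((PySem.Chars.find s k').toNat : Int) := by
        apply pvFind_eq
        · rw [List.drop_take, List.prefix_take_iff]
          exact ⟨hocc, by omega⟩
        · intro i hi hpre
          rw [List.drop_take, List.prefix_take_iff] at hpre
          exact hmin i hi hpre.1
      rw [hres]; omega
    · rw [if_neg (by tauto), PySem.Chars.find_eq_neg_one_iff]
      intro hinf
      have hq : p ≤ (PySem.Chars.find s k').toNat := by omega
      obtain ⟨j, hj⟩ := (PySem.Chars.exists_prefix_drop_iff_isIn k' (s.take p)).2
        ((PySem.Chars.isIn_iff_infix k' (s.take p)).2 hinf)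
      rw [List.drop_take, List.prefix_take_iff] at hj
      have hjq : (PySem.Chars.find s k').toNat ≤ j := by
        by_contra hno; push_neg at hno; exact hmin j hno hj.1
      have : k'.length = 0 := by omega
      exact hk'ne (List.eq_nil_of_length_eq_zero this)
  · have hneg : PySem.Chars.find s k' = -1 := by
      have := PySem.Chars.neg_one_le_find s k'; omega
    rw [if_neg (by tauto), PySem.Chars.find_eq_neg_one_iff]
    rw [PySem.Chars.find_eq_neg_one_iff] at hneg
    intro hinf
    exact hneg (hinf.trans (List.take_prefix p s).isInfix)

theorem pvCuts_nonneg (s : List Char) (K : List (List Char)) :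
    ∀ q ∈ pvCuts s K, 0 ≤ q := by
  intro q hq
  unfold pvCuts at hq
  rw [List.mem_filter] at hq
  obtain ⟨hmem, hne⟩ := hq
  rw [List.mem_map] at hmem
  obtain ⟨k, _, rfl⟩ := hmem
  have := PySem.Chars.neg_one_le_find s k
  simp only [decide_eq_true_eq] at hne
  omega

-- cutting s at a space position p filters the cut positions to those before p
theorem pvCuts_take (s : List Char) (K : List (List Char)) (p : Nat) (f : Int)
    (hf : (p : Int) = f) (hsp : (s.drop p).head? = some ' ')
    (hK : ∀ k ∈ K, pvShape k) :
    pvCuts (s.take p) K = (pvCuts s K).filter (fun q => decide (q < f)) := by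
  induction K with
  | nil => rfl
  | cons k' K ih =>
    obtain ⟨hkh, hkt⟩ := hK k' (by simp)
    have hkt' : ∀ c ∈ k'.tail, c ≠ ' ' := by
      simp only [List.all_eq_true, bne_iff_ne] at hkt
      exact hkt
    have hft := pvFind_take s k' p hsp hkh hkt'
    rw [hf] at hft
    have hih := ih (fun k hk => hK k (by simp [hk]))
    unfold pvCuts at hih ⊢
    simp only [List.map_cons, List.filter_cons, hft]
    by_cases hc : 0 ≤ PySem.Chars.find s k' ∧ PySem.Chars.find s k' < f
    · rw [if_pos hc]
      have h1 : (decide (PySem.Chars.find s k' ≠ -1)) = true := by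
        simp only [decide_eq_true_eq]; omega
      rw [h1, if_pos rfl, if_pos rfl, List.filter_cons,
        show (decide (PySem.Chars.find s k' < f)) = true by simp [hc.2], if_pos rfl, hih]
    · rw [if_neg hc, show (decide ((-1 : Int) ≠ -1)) = false by decide,
        if_neg (by simp), hih]
      by_cases hm1 : PySem.Chars.find s k' = -1
      · rw [hm1, show (decide ((-1 : Int) ≠ -1)) = false by decide, if_neg (by simp)]
      · rw [show (decide (PySem.Chars.find s k' ≠ -1)) = true by simpa using hm1, if_pos rfl,
          List.filter_cons,
          show (decide (PySem.Chars.find s k' < f)) = false by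
            have hb := PySem.Chars.neg_one_le_find s k'
            simp only [decide_eq_false_iff_not, not_lt]
            rcases not_and_or.mp hc with h | h <;> omega,
          if_neg (by simp)]

-- MAIN: A's successive truncations equal one cut at the leftmost keyword occurrence
theorem pvMain (K : List (List Char)) : ∀ s : List Char, (∀ k ∈ K, pvShape k) →
    K.foldl pvStep s = pvCut s K := by
  induction K with
  | nil => intro s _; rfl
  | cons k K ih =>
    intro s hK
    obtain ⟨hkh, hkt⟩ := hK k (by simp)
    have hkne : k ≠ [] := by intro h; simp [h] at hkh
    have hKr : ∀ k' ∈ K, pvShape k' := fun k' hk' => hK k' (by simp [hk'])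
    rw [List.foldl_cons, ih (pvStep s k) hKr, pvStep_eq s k hkne]
    by_cases hin : PySem.Chars.isIn k s = true
    · have h0 : 0 ≤ PySem.Chars.find s k := by
        rw [PySem.Chars.find_nonneg_iff, ← PySem.Chars.isIn_iff_infix]; exact hin
      set f := PySem.Chars.find s k with hfdef
      set p := f.toNat with hpdef
      have hf : (p : Int) = f := Int.toNat_of_nonneg h0
      have hsp : (s.drop p).head? = some ' ' := by
        obtain ⟨hocc, -⟩ := PySem.Chars.find_spec h0
        obtain ⟨t, ht⟩ := hocc
        rw [← ht]
        cases k with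
        | nil => exact absurd rfl hkne
        | cons a k2 =>
          simp only [List.head?_cons, Option.some.injEq] at hkh
          simp [hkh]
      rw [if_pos hin]
      show pvCut (s.take p) K = pvCut s (k :: K)
      have hcuts : pvCuts s (k :: K) = f :: pvCuts s K := by
        unfold pvCuts
        rw [List.map_cons, List.filter_cons,
          show (decide (PySem.Chars.find s k ≠ -1)) = true by simp only [decide_eq_true_eq]; omega,
          if_pos rfl]
      unfold pvCut
      rw [hcuts, pvMin_cons, pvCuts_take s K p f hf hsp hKr]
      have hnn := pvCuts_nonneg s K
      obtain ⟨hminle, hminall⟩ := PySem.List.foldl_min_le (pvCuts s K) f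
      rcases hmem : (pvCuts s K).filter (fun q => decide (q < f)) with _ | ⟨q0, rest⟩
      · have hge : ∀ q ∈ pvCuts s K, f ≤ q := by
          intro q hq
          have := List.filter_eq_nil_iff.mp hmem q hq
          simp only [decide_eq_true_eq] at this
          omega
        have hm : (pvCuts s K).foldl min f = f := by
          rcases PySem.List.foldl_min_mem (pvCuts s K) f with h | h
          · exact h
          · have := hge _ h
            have := hminall _ h
            omega
        show (match pvMin ([] : List Int) with
              | some m => (s.take p).take m.toNat
              | none => s.take p) = s.take ((pvCuts s K).foldl min f).toNat
        rw [show pvMin ([] : List Int) = none from rfl, hm]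
      · rw [pvMin_cons]
        have hq0mem : q0 ∈ (pvCuts s K).filter (fun q => decide (q < f)) := by rw [hmem]; simp
        obtain ⟨hm'le, hm'all⟩ := PySem.List.foldl_min_le rest q0
        have hm'memf : rest.foldl min q0 ∈ (pvCuts s K).filter (fun q => decide (q < f)) := by
          rcases PySem.List.foldl_min_mem rest q0 with h | h
          · rw [h]; exact hq0mem
          · rw [hmem]; simp [h]
        have hm'L : rest.foldl min q0 ∈ pvCuts s K := (List.mem_filter.mp hm'memf).1
        have hm'lt : rest.foldl min q0 < f := by
          have := (List.mem_filter.mp hm'memf).2; simpa using this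
        have heq : (pvCuts s K).foldl min f = rest.foldl min q0 := by
          have h1 : (pvCuts s K).foldl min f ≤ rest.foldl min q0 := hminall _ hm'L
          have h2 : rest.foldl min q0 ≤ (pvCuts s K).foldl min f := by
            rcases PySem.List.foldl_min_mem (pvCuts s K) f with h | h
            · omega
            · have hfmem : (pvCuts s K).foldl min f ∈ (pvCuts s K).filter (fun q => decide (q < f)) := by
                rw [List.mem_filter]
                exact ⟨h, by simp only [decide_eq_true_eq]; omega⟩
              rw [hmem] at hfmem
              rcases List.mem_cons.mp hfmem with h' | h'
              · rw [h']; exact hm'le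
              · exact hm'all _ h'
          omega
        rw [heq]
        show (s.take p).take (rest.foldl min q0).toNat = s.take (rest.foldl min q0).toNat
        rw [List.take_take]
        congr 1
        have h0' : 0 ≤ rest.foldl min q0 := hnn _ hm'L
        omega
    · rw [if_neg hin]
      have hm1 : PySem.Chars.find s k = -1 := by
        rw [PySem.Chars.find_eq_neg_one_iff, ← PySem.Chars.isIn_eq_false_iff]
        simpa using hin
      show pvCut s K = pvCut s (k :: K)
      have : pvCuts s (k :: K) = pvCuts s K := by
        unfold pvCuts
        rw [List.map_cons, List.filter_cons, hm1,
          show (decide ((-1 : Int) ≠ -1)) = false by decide, if_neg (by simp)]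
      unfold pvCut
      rw [this]

-- one String-level truncation step of A computes pvStep on the code points
theorem pvStepBridge (s k : String) (hk : k.toList ≠ []) :
    (if PySem.Str.isIn k s then ((PySem.Str.split? s k).getD []).headD "" else s).toList
      = pvStep s.toList k.toList := by
  unfold pvStep
  simp only [PySem.Str.isIn]
  by_cases hin : PySem.Chars.isIn k.toList s.toList = true
  · rw [if_pos hin, if_pos hin]
    have hsome : PySem.Str.split? s k = some ((PySem.Chars.splitOn s.toList k.toList).map String.ofList) := by
      simp [PySem.Str.split?, PySem.Chars.split?, List.isEmpty_iff, hk]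
    rw [hsome]
    cases h : PySem.Chars.splitOn s.toList k.toList with
    | nil => simp [h]
    | cons a t => simp [h]
  · rw [if_neg hin, if_neg hin]

theorem pvFoldBridge (K : List String) : ∀ (s : String), (∀ k ∈ K, k.toList ≠ []) →
    (K.foldl (fun nome corte =>
        if PySem.Str.isIn corte nome then ((PySem.Str.split? nome corte).getD []).headD "" else nome) s).toList
      = (K.map String.toList).foldl pvStep s.toList := by
  induction K with
  | nil => intro s _; rfl
  | cons k K ih =>
    intro s hK
    rw [List.foldl_cons, List.map_cons, List.foldl_cons,
      ih _ (fun k' h => hK k' (by simp [h])), pvStepBridge s k (hK k (by simp))]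


theorem pvGeneral (K : List String) (s : String)
    (hne : ∀ k ∈ K, k.toList ≠ [])
    (hKL : ∀ k ∈ K.map String.toList, pvShape k) :
    PySem.Str.strip (K.foldl (fun nome corte =>
        if PySem.Str.isIn corte nome then ((PySem.Str.split? nome corte).getD []).headD "" else nome) s) =
      PySem.Str.strip (match PySem.List.min?
          ((K.map (fun c => PySem.Str.find s c)).filter (fun p => decide (p ≠ -1))) (fun p => p) with
        | some m => PySem.Str.slice s none (some m)
        | none => s) := by
  have hA := pvFoldBridge K s hne
  rw [pvMain _ s.toList hKL] at hA
  have hcuts : ((K.map (fun c => PySem.Str.find s c)).filter (fun p => decide (p ≠ -1)))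
      = pvCuts s.toList (K.map String.toList) := by
    simp [pvCuts, List.map_map]
    rfl
  unfold PySem.Str.strip
  congr 1
  rw [hA, hcuts,
    show (PySem.List.min? (pvCuts s.toList (K.map String.toList)) (fun p => p))
      = pvMin (pvCuts s.toList (K.map String.toList)) from rfl]
  unfold pvCut
  cases hmin : pvMin (pvCuts s.toList (K.map String.toList)) with
  | none => rfl
  | some m =>
    have hmem : m ∈ pvCuts s.toList (K.map String.toList) := by
      rcases hl : pvCuts s.toList (K.map String.toList) with _ | ⟨x, xs⟩
      · rw [hl] at hmin
        exact absurd hmin (by simp [pvMin, PySem.List.min?])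
      · rw [hl] at hmin
        rw [pvMin_cons] at hmin
        have hm' : xs.foldl min x = m := by injection hmin
        rcases PySem.List.foldl_min_mem xs x with h | h
        · rw [← hm', h]; exact List.mem_cons_self ..
        · exact List.mem_cons_of_mem _ (hm' ▸ h)
    have h0 : 0 ≤ m := pvCuts_nonneg _ _ _ hmem
    congr 1
    rw [PySem.Str.toList_slice, PySem.Chars.slice_eq_listSlice, PySem.List.slice_to _ h0]

-- ===== VERDICT (by name: the statement is the Claim_ definition above) =====
theorem limpar_nome_spec : Claim_equal_limpar_nome := by
  intro nome _
  show limpar_nome nome = limpar_nome_alt nome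
  simp only [limpar_nome, limpar_nome_alt]
  exact pvGeneral _ nome
    (by simp only [List.forall_mem_cons]
        refine ⟨?_, ?_, ?_, ?_, ?_, ?_, ?_, ?_, List.forall_mem_nil _⟩ <;> decide)
    (by simp only [List.map_cons, List.map_nil, List.forall_mem_cons]
        refine ⟨?_, ?_, ?_, ?_, ?_, ?_, ?_, ?_, List.forall_mem_nil _⟩ <;> exact ⟨by decide, by decide⟩)
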